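-- pv_equiv track=rewrite | github.com/kimryungyo/ProblemSolving | 백준/Gold/23796. 2，147，483，648 게임/2，147，483，648 게임.py | line_left_simulation
-- ===== SOURCE A (Python) =====
-- def line_left_simulation(line):
--     result = []
--     stack = None
--     for item in line:
--         if item:
--             if stack:
--                 if stack == item:
--                     result.append(item * 2)
--                     stack = None
--                 else:
--                     result.append(stack)
--                     stack = item
--             else: stack = item
--
--     if stack: result.append(stack)
--     result += [0] * (8 - len(result))
--     return result
-- ===== SOURCE B (Python) =====
-- def line_left_simulation(line):
--     tiles = [x for x in line if x]
--     result = []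
--     i = 0
--     while i < len(tiles):
--         if i + 1 < len(tiles) and tiles[i] == tiles[i + 1]:
--             result.append(tiles[i] * 2)
--             i += 2
--         else:
--             result.append(tiles[i])
--             i += 1
--     result += [0] * (8 - len(result))
--     return result
-- ===== Notes on version B (the rewrite author's own statement) =====
-- stated objective: alternative
-- what changed: Replaced A's one-pass pending-slot state machine (a 'stack' variable carrying the unmerged tile) with a two-phase compress-then-pairwise-merge: first filter out zeros, then walk the compressed list with an explicit index merging adjacent equal pairs.
import Mathlib
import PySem

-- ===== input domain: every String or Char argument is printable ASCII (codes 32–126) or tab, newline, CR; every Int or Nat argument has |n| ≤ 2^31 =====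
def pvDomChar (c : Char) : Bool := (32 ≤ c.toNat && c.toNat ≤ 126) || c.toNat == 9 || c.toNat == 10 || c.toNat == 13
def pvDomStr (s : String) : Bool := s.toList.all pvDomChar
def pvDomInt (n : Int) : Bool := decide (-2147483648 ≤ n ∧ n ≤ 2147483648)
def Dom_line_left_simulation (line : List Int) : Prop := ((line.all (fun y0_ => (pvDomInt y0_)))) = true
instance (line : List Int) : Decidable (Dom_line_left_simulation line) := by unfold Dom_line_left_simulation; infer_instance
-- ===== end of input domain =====

-- B replaces A's pending-slot state machine with a compress-then-pairwise-merge pass (alternative decomposition, same cost).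
-- ===== PORT A =====
-- State machine: result list plus the pending unmerged tile ('stack', Python None/0 falsy).
def pvStepA (st : List Int × Option Int) (item : Int) : List Int × Option Int :=
  if item ≠ 0 then
    match st.2 with
    | some s =>
        if s ≠ 0 then
          if s = item then (st.1 ++ [item * 2], none)
          else (st.1 ++ [s], some item)
        else (st.1, some item)
    | none => (st.1, some item)
  else st

def pvFinishA (st : List Int × Option Int) : List Int :=
  match st.2 with
  | some s => if s ≠ 0 then st.1 ++ [s] else st.1
  | none => st.1

def line_left_simulation (line : List Int) : List Int :=
  let st := line.foldl pvStepA ([], none)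
  let result := pvFinishA st
  result ++ List.replicate (8 - result.length) 0

-- ===== PORT B =====
-- Pairwise merge of the zero-compressed tile list, explicit index walk as recursion.
def pvMergeB : List Int → List Int
  | [] => []
  | [x] => [x]
  | x :: y :: rest => if x = y then x * 2 :: pvMergeB rest else x :: pvMergeB (y :: rest)

def line_left_simulation_alt (line : List Int) : List Int :=
  let tiles := line.filter (fun x => x ≠ 0)
  let result := pvMergeB tiles
  result ++ List.replicate (8 - result.length) 0

-- ===== PRECONDITION & SPEC =====
def Spec_line_left_simulation (line : List Int) (out : List Int) : Prop := out = line_left_simulation_alt line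
instance (line : List Int) (out : List Int) : Decidable (Spec_line_left_simulation line out) := by unfold Spec_line_left_simulation; infer_instance

-- ===== CLAIM (what is proved, stated in full; the proofs are below) =====
def Claim_equal_line_left_simulation : Prop := ∀ (line : List Int), Dom_line_left_simulation line → Spec_line_left_simulation line (line_left_simulation line)

-- ===== LEMMAS AND PROOFS =====

-- A's loop ignores zero items, so folding over the line equals folding over its nonzero filter.
theorem pv_fold_filter (line : List Int) (st : List Int × Option Int) :
    line.foldl pvStepA st = (line.filter (fun x => x ≠ 0)).foldl pvStepA st := by
  induction line generalizing st with
  | nil => rfl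
  | cons a l ih =>
      by_cases h : a = 0
      · simp [h, pvStepA, List.filter, ih]
      · simp [h, List.filter, List.foldl, ih]

-- On a list of nonzero tiles, A's state machine started with empty pending slot produces the pairwise merge.
theorem pv_fold_merge (tiles : List Int) (res : List Int)
    (h : ∀ x ∈ tiles, x ≠ 0) :
    pvFinishA (tiles.foldl pvStepA (res, none)) = res ++ pvMergeB tiles := by
  induction tiles using pvMergeB.induct generalizing res with
  | case1 => simp [pvFinishA, pvMergeB]
  | case2 x =>
      have hx : x ≠ 0 := h x (by simp)
      simp [pvStepA, pvFinishA, pvMergeB, hx]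
  | case3 y rest ih =>
      have hy : y ≠ 0 := h y (by simp)
      have step : (y :: y :: rest).foldl pvStepA (res, none)
          = rest.foldl pvStepA (res ++ [y * 2], none) := by
        simp [List.foldl, pvStepA, hy]
      rw [step, ih (res ++ [y * 2]) (fun z hz => h z (by simp [hz]))]
      simp [pvMergeB]
  | case4 x y rest hxy ih =>
      have hx : x ≠ 0 := h x (by simp)
      have hy : y ≠ 0 := h y (by simp)
      have step : (x :: y :: rest).foldl pvStepA (res, none)
          = (y :: rest).foldl pvStepA (res ++ [x], none) := by
        simp [List.foldl, pvStepA, hx, hy, hxy]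
      rw [step, ih (res ++ [x]) (fun z hz => h z (by simp [hz]))]
      simp [pvMergeB, hxy]

-- ===== VERDICT (by name: the statement is the Claim_ definition above) =====
theorem line_left_simulation_spec : Claim_equal_line_left_simulation := by
  intro line _
  show line_left_simulation line = line_left_simulation_alt line
  unfold line_left_simulation line_left_simulation_alt
  simp only []
  rw [pv_fold_filter line ([], none)]
  rw [pv_fold_merge _ _ (fun x hx => of_decide_eq_true (List.mem_filter.mp hx).2)]
  simp
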